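-- pv_equiv track=rewrite | github.com/MohiuddinSohel/Leetcoding | amazonOAPreparation/OA.py | assign_request_to_server
-- ===== SOURCE A (Python) =====
-- def assign_request_to_server(n, request):
--     #https://leetcode.com/company/amazon/discuss/5580409/Amazon-OA-Hackerrank-Questions-or-Aug-2024
--     def binary_search(l, r):
--         if r < l:
--             return 0
--         target = arr[r]
--         while l <= r:
--             m = l + (r - l) // 2
--             if arr[m] == target:
--                 r = m - 1
--             elif arr[m] > target:
--                 l = m + 1
--         return l
--
--     arr, result = [0] * n, []
--     for req in request:
--         idx = binary_search(0, req - 1)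
--         arr[idx] += 1
--         result.append(idx)
--     return result
-- ===== SOURCE B (Python) =====
-- def assign_request_to_server(n, request):
--     # Linear scan for the leftmost least-loaded server instead of A's binary search.
--     arr = [0] * n
--     result = []
--     for req in request:
--         idx = 0
--         for i in range(1, req):
--             if arr[i] < arr[idx]:
--                 idx = i
--         arr[idx] += 1
--         result.append(idx)
--     return result
-- ===== Notes on version B (the rewrite author's own statement) =====
-- stated objective: simpler
-- what changed: Replaces A's binary-search helper (which exploits the invariant that the load array stays non-increasing) with a direct linear scan that tracks the leftmost strictly-smaller load over the first req servers.
import Mathlib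
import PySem

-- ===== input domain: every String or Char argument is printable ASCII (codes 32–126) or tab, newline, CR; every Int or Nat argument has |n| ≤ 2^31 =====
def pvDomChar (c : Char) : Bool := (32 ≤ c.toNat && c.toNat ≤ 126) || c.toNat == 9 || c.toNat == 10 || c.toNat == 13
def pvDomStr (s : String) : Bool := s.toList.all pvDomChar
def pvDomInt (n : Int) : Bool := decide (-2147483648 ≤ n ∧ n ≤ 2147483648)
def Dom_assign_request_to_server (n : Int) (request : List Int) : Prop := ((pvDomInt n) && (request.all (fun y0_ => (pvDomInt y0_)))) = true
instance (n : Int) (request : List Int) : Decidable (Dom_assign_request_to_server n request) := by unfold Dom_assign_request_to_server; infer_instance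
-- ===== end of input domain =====

-- B replaces A's binary search (over the non-increasing load array) by a plain
-- leftmost-minimum linear scan; same return value on every input where A returns.

-- ===== PORT A =====
-- the `while l <= r` loop of binary_search; fuel = r - l + 1 suffices because each
-- real iteration shrinks the interval; the two fall-back `l` results mark the spots
-- where Python would raise IndexError resp. loop forever (both unreachable inside Pre_)
def pvBsLoop (arr : List Int) (target l r : Int) (fuel : Nat) : Int :=
  match fuel with
  | 0 => l
  | fuel + 1 =>
    if l ≤ r then
      let m := l + PySem.Int.floordiv (r - l) 2
      match PySem.List.pyGet? arr m with
      | some v =>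
        if v = target then pvBsLoop arr target l (m - 1) fuel
        else if target < v then pvBsLoop arr target (m + 1) r fuel
        else l      -- Python's while loop would spin forever here (unreachable inside Pre_)
      | none => l   -- IndexError in Python (unreachable inside Pre_)
    else l

def pvBinarySearch (arr : List Int) (l r : Int) : Int :=
  if r < l then 0
  else
    match PySem.List.pyGet? arr r with
    | some target => pvBsLoop arr target l r (r - l + 1).toNat
    | none => 0     -- IndexError in Python (outside Pre_)

def pvALoop (arr : List Int) (reqs result : List Int) : List Int :=
  match reqs with
  | [] => result
  | req :: rest =>
    let idx := pvBinarySearch arr 0 (req - 1)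
    match PySem.List.pyGet? arr idx with
    | some v => pvALoop (PySem.List.pySetD arr idx (v + 1)) rest (result ++ [idx])
    | none => result   -- IndexError in Python (outside Pre_)

def assign_request_to_server (n : Int) (request : List Int) : List Int :=
  pvALoop (List.replicate n.toNat 0) request []

-- ===== PORT B =====
-- `for i in range(1, req): if arr[i] < arr[idx]: idx = i`
def pvScanLoop (arr : List Int) (idx : Int) (is_ : List Int) : Option Int :=
  match is_ with
  | [] => some idx
  | i :: rest =>
    match PySem.List.pyGet? arr i, PySem.List.pyGet? arr idx with
    | some vi, some vidx => pvScanLoop arr (if vi < vidx then i else idx) rest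
    | _, _ => none   -- IndexError in Python (outside Pre_)

def pvBLoop (arr : List Int) (reqs acc : List Int) : List Int :=
  match reqs with
  | [] => acc
  | req :: rest =>
    match pvScanLoop arr 0 (PySem.List.pyRange 1 req 1) with
    | none => acc      -- IndexError in Python (outside Pre_)
    | some idx =>
      match PySem.List.pyGet? arr idx with
      | some v => pvBLoop (PySem.List.pySetD arr idx (v + 1)) rest (acc ++ [idx])
      | none => acc    -- IndexError in Python (outside Pre_)

def assign_request_to_server_alt (n : Int) (request : List Int) : List Int :=
  pvBLoop (List.replicate n.toNat 0) request []

-- ===== PRECONDITION & SPEC =====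
-- Pre_ is exactly where Python A returns normally: with a non-empty request list it
-- needs at least one server (arr[idx] += 1 with idx = 0) and every req within bounds
-- (arr[req-1] is read); otherwise A raises IndexError.
def Pre_assign_request_to_server (n : Int) (request : List Int) : Prop :=
  ∀ req ∈ request, 0 < n ∧ req ≤ n
instance (n : Int) (request : List Int) : Decidable (Pre_assign_request_to_server n request) := by
  unfold Pre_assign_request_to_server; infer_instance

def pvWitness_assign_request_to_server : Int × List Int := (3, [1, 3, 3, 2, 3])

def Spec_assign_request_to_server (n : Int) (request : List Int) (out : List Int) : Prop := out = assign_request_to_server_alt n request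
instance (n : Int) (request : List Int) (out : List Int) : Decidable (Spec_assign_request_to_server n request out) := by unfold Spec_assign_request_to_server; infer_instance

-- ===== CLAIM (what is proved, stated in full; the proofs are below) =====
def Claim_equal_assign_request_to_server : Prop := ∀ (n : Int) (request : List Int), Dom_assign_request_to_server n request → Pre_assign_request_to_server n request → Spec_assign_request_to_server n request (assign_request_to_server n request)

-- ===== LEMMAS AND PROOFS =====

def pvNonInc (arr : List Int) : Prop :=
  ∀ i j : Nat, i ≤ j → j < arr.length → arr.getD j 0 ≤ arr.getD i 0

lemma pv_pyGet?_getD (arr : List Int) (i : Int) (h0 : 0 ≤ i) (h : i.toNat < arr.length) :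
    PySem.List.pyGet? arr i = some (arr.getD i.toNat 0) := by
  rw [PySem.List.pyGet?_of_nonneg h0 (xs := arr), List.getElem?_eq_getElem h, List.getD_eq_getElem _ _ h]

lemma pv_getD_set (arr : List Int) (L j : Nat) (v : Int) (hL : L < arr.length) :
    (arr.set L v).getD j 0 = if j = L then v else arr.getD j 0 := by
  by_cases hj : j = L
  · subst hj; simp [List.getD_eq_getElem?_getD, hL]
  · simp [List.getD_eq_getElem?_getD, List.getElem?_set_ne (by omega : L ≠ j), hj]

lemma pv_nonInc_set (arr : List Int) (L : Nat) (hN : pvNonInc arr) (hL : L < arr.length)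
    (hlt : ∀ i : Nat, i < L → arr.getD L 0 < arr.getD i 0) :
    pvNonInc (arr.set L (arr.getD L 0 + 1)) := by
  intro i j hij hjlen
  rw [List.length_set] at hjlen
  rw [pv_getD_set arr L i _ hL, pv_getD_set arr L j _ hL]
  split_ifs with hjL hiL hiL
  · exact le_refl _
  · have := hlt i (by omega)
    omega
  · have := hN L j (by omega) hjlen
    omega
  · exact hN i j hij hjlen

lemma pv_bs_eq (arr : List Int) (target : Int) (R L : Nat) (hRlen : R < arr.length)
    (hplateau : ∀ i : Nat, L ≤ i → i ≤ R → arr.getD i 0 = target)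
    (hlt : ∀ i : Nat, i < L → target < arr.getD i 0) :
    ∀ fuel : Nat, ∀ l r : Int, 0 ≤ l → l ≤ (L : Int) → (L : Int) ≤ r + 1 → r ≤ (R : Int) →
      (r - l + 1).toNat ≤ fuel → pvBsLoop arr target l r fuel = (L : Int) := by
  intro fuel
  induction fuel with
  | zero =>
    intro l r h0 hlL hLr hrR hf
    simp only [pvBsLoop]
    omega
  | succ fuel ih =>
    intro l r h0 hlL hLr hrR hf
    by_cases hlr : l ≤ r
    · have hfd : PySem.Int.floordiv (r - l) 2 = (r - l) / 2 :=
        PySem.Int.floordiv_eq_ediv_of_pos (by norm_num)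
      set m := l + PySem.Int.floordiv (r - l) 2 with hm
      have hmb : l ≤ m ∧ m ≤ r := by rw [hm, hfd]; omega
      have hmlen : m.toNat < arr.length := by omega
      have hget := pv_pyGet?_getD arr m (by omega) hmlen
      simp only [pvBsLoop, if_pos hlr, ← hm, hget]
      by_cases hv : arr.getD m.toNat 0 = target
      · rw [if_pos hv]
        have hLm : L ≤ m.toNat := by
          by_contra hc
          exact absurd hv (ne_of_gt (hlt m.toNat (by omega)))
        exact ih l (m - 1) h0 hlL (by omega) (by omega) (by omega)
      · rw [if_neg hv]
        have hvt : target < arr.getD m.toNat 0 := by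
          rcases lt_or_gt_of_ne hv with hlt' | hgt'
          · exfalso
            have : arr.getD m.toNat 0 = target := by
              by_cases hLm : L ≤ m.toNat
              · exact hplateau m.toNat hLm (by omega)
              · exact absurd (hlt m.toNat (by omega)) (by omega)
            omega
          · exact hgt'
        rw [if_pos hvt]
        have hmL : m.toNat < L := by
          by_contra hc
          have := hplateau m.toNat (by omega) (by omega)
          omega
        exact ih (m + 1) r (by omega) (by omega) hLr hrR (by omega)
    · simp only [pvBsLoop, if_neg hlr]
      omega

lemma pv_scan_done (arr : List Int) (target : Int) (R L : Nat)
    (hplateau : ∀ i : Nat, L ≤ i → i ≤ R → arr.getD i 0 = target)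
    (hlt : ∀ i : Nat, i < L → target < arr.getD i 0)
    (hLR : L ≤ R)
    (idx : Int) (h0 : 0 ≤ idx) (hiR : idx.toNat ≤ R)
    (hmin : ∀ i : Nat, i ≤ R → arr.getD idx.toNat 0 ≤ arr.getD i 0)
    (hleft : ∀ i : Nat, i < idx.toNat → arr.getD idx.toNat 0 < arr.getD i 0) :
    idx = (L : Int) := by
  have h1 : ¬ idx.toNat < L := by
    intro hc
    have := hlt idx.toNat hc
    have := hmin R (le_refl R)
    have := hplateau R hLR (le_refl R)
    omega
  have h2 : ¬ L < idx.toNat := by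
    intro hc
    have := hleft L hc
    have hL := hplateau L (le_refl L) hLR
    have hi := hplateau idx.toNat (by omega) hiR
    omega
  omega

lemma pv_scan_eq (arr : List Int) (target : Int) (R L : Nat) (hRlen : R < arr.length)
    (hLR : L ≤ R)
    (hplateau : ∀ i : Nat, L ≤ i → i ≤ R → arr.getD i 0 = target)
    (hlt : ∀ i : Nat, i < L → target < arr.getD i 0) :
    ∀ fuel : Nat, ∀ k idx : Int, ((R : Int) + 1 - k).toNat ≤ fuel → 1 ≤ k → k ≤ (R : Int) + 1 →
      0 ≤ idx → idx < k →
      (∀ i : Nat, i < k.toNat → arr.getD idx.toNat 0 ≤ arr.getD i 0) →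
      (∀ i : Nat, i < idx.toNat → arr.getD idx.toNat 0 < arr.getD i 0) →
      pvScanLoop arr idx (PySem.List.pyRange k ((R : Int) + 1) 1) = some (L : Int) := by
  intro fuel
  induction fuel with
  | zero =>
    intro k idx hf hk1 hkR h0 hik hmin hleft
    have hk : k = (R : Int) + 1 := by omega
    subst hk
    rw [PySem.List.pyRange_one_eq_nil (by omega)]
    simp only [pvScanLoop, Option.some.injEq]
    exact pv_scan_done arr target R L hplateau hlt hLR idx h0 (by omega)
      (fun i hi => hmin i (by omega)) hleft
  | succ fuel ih =>
    intro k idx hf hk1 hkR h0 hik hmin hleft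
    by_cases hk : k < (R : Int) + 1
    · rw [PySem.List.pyRange_one_cons hk]
      have hklen : k.toNat < arr.length := by omega
      have hilen : idx.toNat < arr.length := by omega
      simp only [pvScanLoop, pv_pyGet?_getD arr k (by omega) hklen,
        pv_pyGet?_getD arr idx h0 hilen]
      by_cases hcmp : arr.getD k.toNat 0 < arr.getD idx.toNat 0
      · rw [if_pos hcmp]
        refine ih (k + 1) k (by omega) (by omega) (by omega) (by omega) (by omega) ?_ ?_
        · intro i hi
          by_cases hik' : i < k.toNat
          · have := hmin i hik'; omega
          · have heq : i = k.toNat := by omega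
            subst heq
            omega
        · intro i hi
          have := hmin i (by omega)
          omega
      · rw [if_neg hcmp]
        refine ih (k + 1) idx (by omega) (by omega) (by omega) h0 (by omega) ?_ hleft
        intro i hi
        by_cases hik' : i < k.toNat
        · exact hmin i hik'
        · have heq : i = k.toNat := by omega
          subst heq
          omega
    · have hk' : k = (R : Int) + 1 := by omega
      subst hk'
      rw [PySem.List.pyRange_one_eq_nil (by omega)]
      simp only [pvScanLoop, Option.some.injEq]
      exact pv_scan_done arr target R L hplateau hlt hLR idx h0 (by omega)
        (fun i hi => hmin i (by omega)) hleft

lemma pv_step (arr : List Int) (req : Int) (hN : pvNonInc arr) (hpos : 0 < arr.length)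
    (hle : req ≤ (arr.length : Int)) :
    ∃ L : Nat, L < arr.length ∧
      pvBinarySearch arr 0 (req - 1) = (L : Int) ∧
      pvScanLoop arr 0 (PySem.List.pyRange 1 req 1) = some (L : Int) ∧
      (∀ i : Nat, i < L → arr.getD L 0 < arr.getD i 0) := by
  by_cases hreq : req ≤ 1
  · refine ⟨0, hpos, ?_, ?_, fun i hi => absurd hi (by omega)⟩
    · by_cases hz : req ≤ 0
      · unfold pvBinarySearch
        rw [if_pos (by omega)]
        rfl
      · have h1 : req = 1 := by omega
        subst h1
        unfold pvBinarySearch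
        rw [if_neg (by omega)]
        norm_num
        rw [pv_pyGet?_getD arr 0 (by omega) (by simpa using hpos)]
        exact pv_bs_eq arr (arr.getD (0:Int).toNat 0) 0 0 hpos
          (fun i h1 h2 => by have h00 : i = 0 := (by omega); simp [h00])
          (fun i hi => absurd hi (by omega))
          1 0 0 (by omega) (by omega) (by omega) (by omega) (by omega)
    · rw [PySem.List.pyRange_one_eq_nil (by omega)]
      rfl
  · -- req ≥ 2
    have hreq2 : 2 ≤ req := by omega
    set R : Nat := (req - 1).toNat with hR
    have hRlen : R < arr.length := by omega
    have hRint : (R : Int) = req - 1 := by omega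
    set target := arr.getD R 0 with htg
    have hex : ∃ i : Nat, arr.getD i 0 = target := ⟨R, rfl⟩
    set L := Nat.find hex with hL
    have hLfind : arr.getD L 0 = target := Nat.find_spec hex
    have hLR : L ≤ R := Nat.find_min' hex rfl
    have hlt : ∀ i : Nat, i < L → target < arr.getD i 0 := by
      intro i hi
      have hne : arr.getD i 0 ≠ target := Nat.find_min hex hi
      have hge : arr.getD R 0 ≤ arr.getD i 0 := hN i R (by omega) hRlen
      omega
    have hplateau : ∀ i : Nat, L ≤ i → i ≤ R → arr.getD i 0 = target := by
      intro i h1 h2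
      have hub : arr.getD i 0 ≤ arr.getD L 0 := hN L i h1 (by omega)
      have hlb : arr.getD R 0 ≤ arr.getD i 0 := hN i R h2 hRlen
      omega
    refine ⟨L, by omega, ?_, ?_, fun i hi => by rw [hLfind]; exact hlt i hi⟩
    · unfold pvBinarySearch
      rw [if_neg (by omega)]
      have hget : PySem.List.pyGet? arr (req - 1) = some target := by
        rw [pv_pyGet?_getD arr (req - 1) (by omega) (by omega)]
      rw [hget]
      exact pv_bs_eq arr target R L hRlen hplateau hlt (req - 1 - 0 + 1).toNat 0 (req - 1)
        (by omega) (by omega) (by omega) (by omega) (by omega)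
    · have hrw : req = (R : Int) + 1 := by omega
      rw [hrw]
      refine pv_scan_eq arr target R L hRlen hLR hplateau hlt R 1 0 (by omega) (by omega)
        (by omega) (by omega) (by omega) ?_ (fun i hi => absurd hi (by omega))
      intro i hi
      have : i = 0 := by omega
      subst this
      simp

lemma pv_loop_eq (reqs : List Int) : ∀ (arr acc : List Int), pvNonInc arr → 0 < arr.length →
    (∀ req ∈ reqs, req ≤ (arr.length : Int)) →
    pvALoop arr reqs acc = pvBLoop arr reqs acc := by
  induction reqs with
  | nil => intro arr acc _ _ _; rfl
  | cons req rest ih =>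
    intro arr acc hN hpos hle
    obtain ⟨L, hLlen, hbs, hscan, hlt⟩ :=
      pv_step arr req hN hpos (hle req (List.mem_cons_self))
    have hget : PySem.List.pyGet? arr (L : Int) = some (arr.getD L 0) := by
      rw [pv_pyGet?_getD arr (L : Int) (by omega) (by simpa using hLlen)]
      simp
    have hset : PySem.List.pySetD arr (L : Int) (arr.getD L 0 + 1)
        = arr.set L (arr.getD L 0 + 1) := by
      simp [PySem.List.pySetD_natCast]
    have hrec := ih (arr.set L (arr.getD L 0 + 1)) (acc ++ [(L : Int)])
      (pv_nonInc_set arr L hN hLlen hlt)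
      (by simpa using hpos)
      (by intro r hr; rw [List.length_set]; exact hle r (List.mem_cons_of_mem _ hr))
    calc pvALoop arr (req :: rest) acc
        = pvALoop (arr.set L (arr.getD L 0 + 1)) rest (acc ++ [(L : Int)]) := by
          simp only [pvALoop, hbs, hget, hset]
      _ = pvBLoop (arr.set L (arr.getD L 0 + 1)) rest (acc ++ [(L : Int)]) := hrec
      _ = pvBLoop arr (req :: rest) acc := by
          simp only [pvBLoop, hscan, hget, hset]

lemma pv_replicate_nonInc (m : Nat) : pvNonInc (List.replicate m (0 : Int)) := by
  intro i j hij hjlen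
  rw [List.length_replicate] at hjlen
  simp [List.getD_eq_getElem?_getD, hjlen, Nat.lt_of_le_of_lt hij hjlen]

lemma pv_final : ∀ (n : Int) (request : List Int),
    (∀ req ∈ request, 0 < n ∧ req ≤ n) →
    pvALoop (List.replicate n.toNat 0) request [] = pvBLoop (List.replicate n.toNat 0) request [] := by
  intro n request hpre
  cases request with
  | nil => rfl
  | cons r rest =>
    have hn : 0 < n := (hpre r List.mem_cons_self).1
    refine pv_loop_eq (r :: rest) _ [] (pv_replicate_nonInc n.toNat) (by simp; omega) ?_
    intro req hreq
    have := hpre req hreq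
    simp only [List.length_replicate]
    omega

-- ===== VERDICT (by name: the statement is the Claim_ definition above) =====
theorem assign_request_to_server_spec : Claim_equal_assign_request_to_server := by
  intro n request _ hpre
  unfold Spec_assign_request_to_server assign_request_to_server assign_request_to_server_alt
  exact pv_final n request hpre
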